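-- pv_equiv track=rewrite | github.com/mukerem/A2SV_ACL23 | A2SV_ACL23_Knockout_stage.py | disjoint_count
-- ===== SOURCE A (Python) =====
-- def disjoint_count(arr, k):
--     n = len(arr)
--     maxx = 1
--     current = 1
--     for i in range(1, n):
--         if arr[i] == arr[i-1]:
--             current += 1
--         else:
--             maxx = max(maxx, current)
--             current = 1
--     maxx = max(maxx, current)
--     size = n // maxx
--     return size >= k
-- ===== SOURCE B (Python) =====
-- def disjoint_count(arr, k):
--     # Change-point formulation: instead of counting runs, find the positions
--     # where the value changes; the longest run is the largest gap between
--     # consecutive boundaries 0, change-points..., n.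
--     n = len(arr)
--     if n == 0:
--         return 0 >= k
--     breaks = [i for i in range(1, n) if arr[i] != arr[i - 1]]
--     bounds = [0] + breaks + [n]
--     maxx = max(b - a for a, b in zip(bounds, bounds[1:]))
--     return n // maxx >= k
-- ===== Notes on version B (the rewrite author's own statement) =====
-- stated objective: alternative
-- what changed: Replaces A's running-counter/running-max run scan with a change-point formulation: collect the indices where adjacent values differ, form the boundary list [0]+breaks+[n], and take the largest gap between consecutive boundaries as the longest run.
import Mathlib
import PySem

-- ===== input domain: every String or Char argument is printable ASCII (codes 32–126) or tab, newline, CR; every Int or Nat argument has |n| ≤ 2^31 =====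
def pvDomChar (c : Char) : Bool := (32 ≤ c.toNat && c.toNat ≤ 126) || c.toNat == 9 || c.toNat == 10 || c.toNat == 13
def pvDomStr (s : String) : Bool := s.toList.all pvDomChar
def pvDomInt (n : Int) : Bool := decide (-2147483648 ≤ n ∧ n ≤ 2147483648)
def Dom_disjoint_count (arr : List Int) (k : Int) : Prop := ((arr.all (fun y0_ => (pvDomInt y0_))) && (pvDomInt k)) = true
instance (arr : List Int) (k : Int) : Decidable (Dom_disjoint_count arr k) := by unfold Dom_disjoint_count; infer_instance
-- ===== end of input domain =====

-- B replaces A's running-counter/running-max run scan by a change-point formulation: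
-- collect the indices where adjacent values differ, and take the largest gap between
-- consecutive boundaries [0]+breaks+[n] (objective: alternative).

-- ===== PORT A =====
-- A's loop over range(1, n); arr[i] / arr[i-1] are always in range there, so pyGetD's default is never used.
def disjoint_count (arr : List Int) (k : Int) : Bool :=
  let n : Int := PySem.List.len arr
  let st := (PySem.List.pyRange 1 n).foldl
    (fun (st : Int × Int) i =>
      if PySem.List.pyGetD arr i 0 == PySem.List.pyGetD arr (i - 1) 0
      then (st.1, st.2 + 1)
      else (max st.1 st.2, 1)) (1, 1)
  let maxx := max st.1 st.2
  decide (PySem.Int.floordiv n maxx ≥ k)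

-- ===== PORT B =====
-- `[i for i in range(1, n) if arr[i] != arr[i-1]]` is a filter over pyRange;
-- `max(b - a for a, b in zip(bounds, bounds[1:]))` is maxD over the zipWith of
-- bounds and bounds.drop 1 (bounds is nonempty here, so the default 0 is never used).
def disjoint_count_alt (arr : List Int) (k : Int) : Bool :=
  let n : Int := PySem.List.len arr
  if n == 0 then decide ((0 : Int) ≥ k)
  else
    let breaks := (PySem.List.pyRange 1 n).filter
      (fun i => PySem.List.pyGetD arr i 0 != PySem.List.pyGetD arr (i - 1) 0)
    let bounds := 0 :: breaks ++ [n]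
    let maxx := PySem.List.maxD (List.zipWith (fun a b => b - a) bounds (bounds.drop 1))
      (fun v => v) 0
    decide (PySem.Int.floordiv n maxx ≥ k)

-- ===== PRECONDITION & SPEC =====
def Spec_disjoint_count (arr : List Int) (k : Int) (out : Bool) : Prop := out = disjoint_count_alt arr k
instance (arr : List Int) (k : Int) (out : Bool) : Decidable (Spec_disjoint_count arr k out) := by unfold Spec_disjoint_count; infer_instance

-- ===== CLAIM (what is proved, stated in full; the proofs are below) =====
def Claim_equal_disjoint_count : Prop := ∀ (arr : List Int) (k : Int), Dom_disjoint_count arr k → Spec_disjoint_count arr k (disjoint_count arr k)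

-- ===== LEMMAS AND PROOFS =====

-- A's loop rephrased structurally: walk the tail carrying the previous element.
def loopA (prev : Int) (xs : List Int) (st : Int × Int) : Int × Int :=
  match xs with
  | [] => st
  | y :: ys => loopA y ys (if y == prev then (st.1, st.2 + 1) else (max st.1 st.2, 1))

-- The list of run lengths emitted one element at a time (common reference for both sides).
def goRuns (prev cur : Int) (xs : List Int) : List Int :=
  match xs with
  | [] => [cur]
  | y :: ys => if y == prev then goRuns y (cur + 1) ys else cur :: goRuns y 1 ys

-- B's break indices rephrased structurally: walk the tail carrying position and previous element.
def breaksL (base : Int) (prev : Int) (xs : List Int) : List Int :=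
  match xs with
  | [] => []
  | y :: ys => if y == prev then breaksL (base + 1) y ys else base :: breaksL (base + 1) y ys

def gaps (l : List Int) : List Int := List.zipWith (fun a b => b - a) l (l.drop 1)

lemma getD_append_len (l1 l2 : List Int) (j : Nat) :
    (l1 ++ l2).getD (l1.length + j) 0 = l2.getD j 0 := by
  simp [List.getD_eq_getElem?_getD, List.getElem?_append_right]

lemma pyGetD_mid (pre rest : List Int) (prev : Int) :
    PySem.List.pyGetD (pre ++ prev :: rest) ((pre.length : Int)) 0 = prev := by
  rw [PySem.List.pyGetD_natCast]
  have : pre.length = pre.length + 0 := by omega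
  rw [this, getD_append_len]
  rfl

lemma bridgeA (arr : List Int) : ∀ (rest pre : List Int) (prev : Int) (st : Int × Int),
    arr = pre ++ prev :: rest →
    (PySem.List.pyRange ((pre.length : Int) + 1) (PySem.List.len arr)).foldl
      (fun (st : Int × Int) i =>
        if PySem.List.pyGetD arr i 0 == PySem.List.pyGetD arr (i - 1) 0
        then (st.1, st.2 + 1)
        else (max st.1 st.2, 1)) st
    = loopA prev rest st := by
  intro rest
  induction rest with
  | nil =>
    intro pre prev st h
    have hlen : PySem.List.len arr = (pre.length : Int) + 1 := by
      subst h; simp [PySem.List.len]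
    rw [hlen]
    have : PySem.List.pyRange ((pre.length : Int) + 1) ((pre.length : Int) + 1) = [] := by
      simp [PySem.List.pyRange]
    rw [this]
    rfl
  | cons y ys ih =>
    intro pre prev st h
    have hlen : PySem.List.len arr = (pre.length : Int) + 1 + 1 + (ys.length : Int) := by
      subst h; simp [PySem.List.len]; ring
    have hlt : (pre.length : Int) + 1 < PySem.List.len arr := by rw [hlen]; omega
    rw [PySem.List.pyRange_one_cons hlt, List.foldl_cons]
    have hy : PySem.List.pyGetD arr ((pre.length : Int) + 1) 0 = y := by
      have h2 : arr = (pre ++ [prev]) ++ y :: ys := by rw [h]; simp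
      have h3 : ((pre.length : Int) + 1) = (((pre ++ [prev]).length : Nat) : Int) := by simp
      rw [h2, h3, pyGetD_mid]
    have hprev : PySem.List.pyGetD arr ((pre.length : Int) + 1 - 1) 0 = prev := by
      have : ((pre.length : Int) + 1 - 1) = ((pre.length : Nat) : Int) := by ring
      rw [this, h, pyGetD_mid]
    rw [hy, hprev]
    have harr : arr = (pre ++ [prev]) ++ y :: ys := by rw [h]; simp
    have hstart : ((pre.length : Int) + 1) + 1 = (((pre ++ [prev]).length : Nat) : Int) + 1 := by
      simp
    rw [loopA]
    split_ifs with hcond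
    · simpa [hcond, hstart] using ih (pre ++ [prev]) y (st.1, st.2 + 1) harr
    · simpa [hcond, hstart] using ih (pre ++ [prev]) y (max st.1 st.2, 1) harr

lemma bridgeB (arr : List Int) : ∀ (rest pre : List Int) (prev : Int),
    arr = pre ++ prev :: rest →
    (PySem.List.pyRange ((pre.length : Int) + 1) (PySem.List.len arr)).filter
      (fun i => PySem.List.pyGetD arr i 0 != PySem.List.pyGetD arr (i - 1) 0)
    = breaksL ((pre.length : Int) + 1) prev rest := by
  intro rest
  induction rest with
  | nil =>
    intro pre prev h
    have hlen : PySem.List.len arr = (pre.length : Int) + 1 := by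
      subst h; simp [PySem.List.len]
    rw [hlen]
    have : PySem.List.pyRange ((pre.length : Int) + 1) ((pre.length : Int) + 1) = [] := by
      simp [PySem.List.pyRange]
    rw [this]
    rfl
  | cons y ys ih =>
    intro pre prev h
    have hlen : PySem.List.len arr = (pre.length : Int) + 1 + 1 + (ys.length : Int) := by
      subst h; simp [PySem.List.len]; ring
    have hlt : (pre.length : Int) + 1 < PySem.List.len arr := by rw [hlen]; omega
    rw [PySem.List.pyRange_one_cons hlt, List.filter_cons]
    have hy : PySem.List.pyGetD arr ((pre.length : Int) + 1) 0 = y := by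
      have h2 : arr = (pre ++ [prev]) ++ y :: ys := by rw [h]; simp
      have h3 : ((pre.length : Int) + 1) = (((pre ++ [prev]).length : Nat) : Int) := by simp
      rw [h2, h3, pyGetD_mid]
    have hprev : PySem.List.pyGetD arr ((pre.length : Int) + 1 - 1) 0 = prev := by
      have : ((pre.length : Int) + 1 - 1) = ((pre.length : Nat) : Int) := by ring
      rw [this, h, pyGetD_mid]
    rw [hy, hprev]
    have harr : arr = (pre ++ [prev]) ++ y :: ys := by rw [h]; simp
    have hstart : ((pre.length : Int) + 1) + 1 = (((pre ++ [prev]).length : Nat) : Int) + 1 := by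
      simp
    have hih := ih (pre ++ [prev]) y harr
    simp only [List.length_append, List.length_cons, List.length_nil, Nat.cast_add,
      Nat.cast_one, zero_add] at hih
    simp only [PySem.List.len] at hih
    rw [breaksL]
    by_cases hcond : y = prev
    · rw [hcond] at hih
      simpa [hcond, PySem.List.len] using hih
    · simpa [hcond, PySem.List.len] using hih

lemma loop_max : ∀ (xs : List Int) (prev maxx cur : Int),
    max (loopA prev xs (maxx, cur)).1 (loopA prev xs (maxx, cur)).2
      = (goRuns prev cur xs).foldl max maxx := by
  intro xs
  induction xs with
  | nil => intro prev maxx cur; simp [loopA, goRuns]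
  | cons y ys ih =>
    intro prev maxx cur
    by_cases h : (y == prev) = true
    · simp [loopA, goRuns, h, ih]
    · simp [loopA, goRuns, h, ih]

lemma gaps_cons (a b : Int) (t : List Int) :
    gaps (a :: b :: t) = (b - a) :: gaps (b :: t) := by
  simp [gaps]

lemma gaps_breaks : ∀ (xs : List Int) (prev base cur : Int),
    gaps ((base - cur) :: (breaksL base prev xs ++ [base + (xs.length : Int)]))
      = goRuns prev cur xs := by
  intro xs
  induction xs with
  | nil =>
    intro prev base cur
    simp [breaksL, goRuns, gaps]
  | cons y ys ih =>
    intro prev base cur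
    by_cases h : (y == prev) = true
    · rw [breaksL, if_pos h, goRuns, if_pos h]
      rw [show base + ((y :: ys).length : Int) = (base + 1) + (ys.length : Int) by
        push_cast [List.length_cons]; ring]
      rw [show base - cur = (base + 1) - (cur + 1) by ring]
      exact ih y (base + 1) (cur + 1)
    · rw [breaksL, if_neg h, goRuns, if_neg h]
      rw [show base + ((y :: ys).length : Int) = (base + 1) + (ys.length : Int) by
        push_cast [List.length_cons]; ring]
      rw [List.cons_append, gaps_cons]
      congr 1
      · ring
      · have := ih y (base + 1) 1
        rw [add_sub_cancel_right] at this
        exact this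

lemma goRuns_ne_nil : ∀ (xs : List Int) (prev cur : Int), goRuns prev cur xs ≠ [] := by
  intro xs
  induction xs with
  | nil => intro prev cur; simp [goRuns]
  | cons y ys ih => intro prev cur; rw [goRuns]; split_ifs <;> simp [ih]

-- head of goRuns is cur + (length of leading run) ≥ cur
lemma goRuns_head_ge : ∀ (xs : List Int) (prev cur : Int) (r : Int) (rt : List Int),
    goRuns prev cur xs = r :: rt → cur ≤ r := by
  intro xs
  induction xs with
  | nil => intro prev cur r rt h; rw [goRuns] at h; injection h with h1 _; omega
  | cons y ys ih =>
    intro prev cur r rt h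
    rw [goRuns] at h
    by_cases hc : (y == prev) = true
    · rw [if_pos hc] at h
      have := ih y (cur + 1) r rt h
      omega
    · rw [if_neg hc] at h
      injection h with h1 _
      omega

-- ===== VERDICT (by name: the statement is the Claim_ definition above) =====
theorem disjoint_count_spec : Claim_equal_disjoint_count := by
  unfold Claim_equal_disjoint_count
  intro arr k _
  unfold Spec_disjoint_count
  cases arr with
  | nil => rfl
  | cons x xs =>
    simp only [disjoint_count, disjoint_count_alt]
    rw [if_neg (show ¬ (PySem.List.len (x :: xs) == 0) = true by
      simp [PySem.List.len]; omega)]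
    have hb := bridgeA (x :: xs) xs [] x (1, 1) rfl
    simp only [List.length_nil, Nat.cast_zero, zero_add] at hb
    rw [hb, loop_max]
    have hbb := bridgeB (x :: xs) xs [] x rfl
    simp only [List.length_nil, Nat.cast_zero, zero_add] at hbb
    rw [hbb]
    have hg : gaps (0 :: (breaksL 1 x xs ++ [PySem.List.len (x :: xs)])) = goRuns x 1 xs := by
      have h1 : (0 : Int) = 1 - 1 := by ring
      have h2 : PySem.List.len (x :: xs) = 1 + (xs.length : Int) := by
        simp [PySem.List.len]; omega
      rw [h1, h2]
      exact gaps_breaks xs x 1 1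
    have hzip : List.zipWith (fun a b => b - a)
        (0 :: breaksL 1 x xs ++ [PySem.List.len (x :: xs)])
        ((0 :: breaksL 1 x xs ++ [PySem.List.len (x :: xs)]).drop 1)
        = goRuns x 1 xs := by
      rw [← hg]; rfl
    rw [hzip]
    set rs := goRuns x 1 xs with hrs
    have hne : rs ≠ [] := goRuns_ne_nil xs x 1
    obtain ⟨r, rt, hr⟩ := List.exists_cons_of_ne_nil hne
    have hr1 : 1 ≤ r := goRuns_head_ge xs x 1 r rt (hrs ▸ hr)
    rw [hr]
    have hfold : (r :: rt).foldl max 1 = rt.foldl max r := by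
      simp [List.foldl_cons, max_eq_right hr1]
    rw [hfold]
    have hmaxD : PySem.List.maxD (r :: rt) (fun v => v) 0 = rt.foldl max r := by
      simp [PySem.List.maxD, PySem.List.max?_id_cons]
    rw [hmaxD]
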